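-- pv_equiv track=rewrite | github.com/sigmajove/Sicherman2024 | follow_border.py | valley_to_valley
-- ===== SOURCE A (Python) =====
-- import math
--
-- def valley_to_valley(border):
--     """Here is a filter that enormously speeds up the search.
--     When the final border is placed, for the solution to be
--     correct, it must fill in all remaining valleys. Since
--     we are blindly assembling pieces with no guiding intelligence,
--     the valleys tend to get equally spread out along the border.
--     This function traverses a border and finds the smallest section
--     that touches every valley. If that value is larger than the
--     circumference of the final border, there is no point in trying
--     every way that border can be attached.
--     """
--     # Find a valley
--     one_valley = next((i for i, v in enumerate(border) if 4 <= v[0] <= 5), None)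
--     if one_valley is None:
--         # There is no valley
--         return 0
--
--     max_delta = -math.inf
--     i = (one_valley + 1) % len(border)
--     prev_valley = one_valley
--     while True:
--         if 4 <= border[i][0] <= 5:
--             # vertex i is a valley
--             delta = i - prev_valley
--             if delta <= 0:
--                 delta += len(border)
--             if delta > max_delta:
--                 max_delta = delta
--             if i == one_valley:
--                 # We have measured every valley
--                 return len(border) - max_delta
--             prev_valley = i
--         i = (i + 1) % len(border)
-- ===== SOURCE B (Python) =====
-- def valley_to_valley(border):
--     """Sliding window: the answer is the smallest circular span that covers
--     all k valleys, found as the minimum over windows of k consecutive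
--     valleys in the doubled valley sequence (no explicit max-gap computation)."""
--     n = len(border)
--     valleys = [i for i, v in enumerate(border) if 4 <= v[0] <= 5]
--     k = len(valleys)
--     if k == 0:
--         return 0
--     doubled = valleys + [v + n for v in valleys]
--     return min(doubled[t + k - 1] - doubled[t] for t in range(k))
-- ===== Notes on version B (the rewrite author's own statement) =====
-- stated objective: alternative
-- what changed: Replaces A's modular max-gap walk (cursor stepping (i+1)%len from the first valley, tracking the running maximum gap and returning len minus it) by a sliding-window formulation: the answer is computed directly as the minimum span of k consecutive valleys over the doubled valley sequence, with no gap or maximum-gap computation at all.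
import Mathlib
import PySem

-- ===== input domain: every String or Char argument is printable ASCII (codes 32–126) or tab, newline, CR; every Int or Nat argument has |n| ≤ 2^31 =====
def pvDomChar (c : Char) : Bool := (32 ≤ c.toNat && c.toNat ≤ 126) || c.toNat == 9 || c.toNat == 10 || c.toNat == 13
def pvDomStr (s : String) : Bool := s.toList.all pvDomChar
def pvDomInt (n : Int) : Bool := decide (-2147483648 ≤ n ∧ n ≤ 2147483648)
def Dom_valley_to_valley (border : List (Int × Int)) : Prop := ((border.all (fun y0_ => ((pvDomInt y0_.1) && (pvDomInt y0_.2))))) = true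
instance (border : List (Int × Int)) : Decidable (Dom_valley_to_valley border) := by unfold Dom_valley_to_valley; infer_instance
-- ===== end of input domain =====

-- B replaces A's modular max-gap walk by a sliding window: the answer is the minimum span of
-- k consecutive valleys in the doubled valley sequence (objective: alternative algorithm, same cost).

-- ===== PORT A =====
-- '4 <= v[0] <= 5' (the valley test, shared verbatim by both Pythons)
def pvIsValley (v : Int × Int) : Bool := decide (4 ≤ v.1 ∧ v.1 ≤ 5)

-- next((i for i, v in enumerate(border) if 4 <= v[0] <= 5), None)
def pvFirstValley : List (Int × Int) → Int → Option Int
  | [], _ => none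
  | v :: rest, i => if pvIsValley v then some i else pvFirstValley rest (i + 1)

-- the 'while True' loop; fuel = len(border) suffices (the loop returns when i comes back
-- to one_valley, after exactly len(border) steps); max_delta = -inf is the 'none' state
def pvLoopA (border : List (Int × Int)) (n ov : Int) :
    Nat → Int → Int → Option Int → Int
  | 0, _, _, _ => 0  -- fuel exhausted: unreachable with fuel = len(border)
  | fuel + 1, i, prev, maxd =>
    match PySem.List.pyGet? border i with
    | none => 0  -- IndexError: unreachable, i stays in [0, n)
    | some v =>
      if pvIsValley v then
        let delta0 := i - prev
        let delta := if delta0 ≤ 0 then delta0 + n else delta0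
        let m' : Int := match maxd with
          | none => delta
          | some m => if delta > m then delta else m
        if i = ov then n - m'
        else pvLoopA border n ov fuel (PySem.Int.mod (i + 1) n) i (some m')
      else pvLoopA border n ov fuel (PySem.Int.mod (i + 1) n) prev maxd

def valley_to_valley (border : List (Int × Int)) : Int :=
  match pvFirstValley border 0 with
  | none => 0
  | some ov =>
    let n : Int := border.length
    pvLoopA border n ov border.length (PySem.Int.mod (ov + 1) n) ov none

-- ===== PORT B =====
-- valleys = [i for i, v in enumerate(border) if 4 <= v[0] <= 5]
def pvValleys (border : List (Int × Int)) : List Int :=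
  (PySem.List.enumerate border).filterMap (fun p => if pvIsValley p.2 then some p.1 else none)

def valley_to_valley_alt (border : List (Int × Int)) : Int :=
  let n : Int := border.length
  let valleys := pvValleys border
  let k := valleys.length
  if k = 0 then 0
  else
    let doubled := valleys ++ valleys.map (fun v => v + n)
    -- min(doubled[t+k-1] - doubled[t] for t in range(k)); indices always in [0, 2k), so the
    -- pyGetD default is never taken, and k ≥ 1 means min's iterable is never empty
    match PySem.List.min?
        ((PySem.List.pyRange 0 (k : Int) 1).map
          (fun t => PySem.List.pyGetD doubled (t + (k : Int) - 1) 0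
                  - PySem.List.pyGetD doubled t 0)) (fun y => y) with
    | some m => m
    | none => 0  -- unreachable: k ≥ 1

-- ===== PRECONDITION & SPEC =====
def Spec_valley_to_valley (border : List (Int × Int)) (out : Int) : Prop := out = valley_to_valley_alt border
instance (border : List (Int × Int)) (out : Int) : Decidable (Spec_valley_to_valley border out) := by unfold Spec_valley_to_valley; infer_instance

-- ===== CLAIM (what is proved, stated in full; the proofs are below) =====
def Claim_equal_valley_to_valley : Prop := ∀ (border : List (Int × Int)), Dom_valley_to_valley border → Spec_valley_to_valley border (valley_to_valley border)

-- ===== LEMMAS AND PROOFS =====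

-- proof-side helper definitions
def pvValleyAt (border : List (Int × Int)) (i : Int) : Bool :=
  match PySem.List.pyGet? border i with
  | some v => pvIsValley v
  | none => false

def pvIntRange (a : Int) : Nat → List Int
  | 0 => []
  | f + 1 => a :: pvIntRange (a + 1) f

def pvVisit (n : Int) : Nat → Int → List Int
  | 0, _ => []
  | f + 1, i => i :: pvVisit n f (PySem.Int.mod (i + 1) n)

def pvIter (n : Int) : Nat → Int → Int
  | 0, i => i
  | f + 1, i => pvIter n f (PySem.Int.mod (i + 1) n)

def pvProc (border : List (Int × Int)) (n ov : Int) : List Int → Int → Option Int → Int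
  | [], _, _ => 0
  | i :: rest, prev, maxd =>
    match PySem.List.pyGet? border i with
    | none => 0
    | some v =>
      if pvIsValley v then
        let delta0 := i - prev
        let delta := if delta0 ≤ 0 then delta0 + n else delta0
        let m' : Int := match maxd with
          | none => delta
          | some m => if delta > m then delta else m
        if i = ov then n - m'
        else pvProc border n ov rest i (some m')
      else pvProc border n ov rest prev maxd

def pvProcV (n ov : Int) : List Int → Int → Option Int → Int
  | [], _, _ => 0
  | w :: ws, prev, maxd =>
    let delta0 := w - prev
    let delta := if delta0 ≤ 0 then delta0 + n else delta0
    let m' : Int := match maxd with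
      | none => delta
      | some m => if delta > m then delta else m
    if w = ov then n - m'
    else pvProcV n ov ws w (some m')

def pvGapsOf : Int → List Int → List Int
  | _, [] => []
  | p, w :: ws => (w - p) :: pvGapsOf w ws

def pvLastOf : Int → List Int → Int
  | p, [] => p
  | _, w :: ws => pvLastOf w ws

-- definitional bridge: the fuel loop processes exactly the visited index list
theorem pvLoopA_eq_proc (border : List (Int × Int)) (n ov : Int) :
    ∀ (f : Nat) (i prev : Int) (maxd : Option Int),
      pvLoopA border n ov f i prev maxd = pvProc border n ov (pvVisit n f i) prev maxd := by
  intro f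
  induction f with
  | zero => intro i prev maxd; rfl
  | succ f ih =>
    intro i prev maxd
    simp only [pvLoopA, pvVisit, pvProc]
    cases h : PySem.List.pyGet? border i with
    | none => rfl
    | some v =>
      by_cases hv : pvIsValley v
      · by_cases hio : i = ov
        · simp [hv, hio]
        · simp [hv, hio, ih]
      · simp [hv, ih]

theorem pvVisit_straight (n : Int) (hn : 0 < n) :
    ∀ (f : Nat) (i : Int), 0 ≤ i → i + (f : Int) ≤ n → pvVisit n f i = pvIntRange i f := by
  intro f
  induction f with
  | zero => intro i _ _; rfl
  | succ f ih =>
    intro i h0 hle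
    simp only [pvVisit, pvIntRange]
    by_cases hf : f = 0
    · subst hf; simp [pvVisit, pvIntRange]
    · have hi1 : i + 1 < n := by
        have : (1:Int) ≤ (f:Int) := by exact_mod_cast Nat.one_le_iff_ne_zero.mpr hf
        push_cast at hle ⊢; omega
      have hm : PySem.Int.mod (i + 1) n = i + 1 := by
        rw [PySem.Int.mod_eq_emod_of_pos hn, Int.emod_eq_of_lt (by omega) hi1]
      rw [hm, ih (i+1) (by omega) (by push_cast at hle ⊢; omega)]

theorem pvVisit_add (n : Int) :
    ∀ (f1 f2 : Nat) (i : Int),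
      pvVisit n (f1 + f2) i = pvVisit n f1 i ++ pvVisit n f2 (pvIter n f1 i) := by
  intro f1
  induction f1 with
  | zero => intro f2 i; simp [pvVisit, pvIter]
  | succ f1 ih =>
    intro f2 i
    have h1 : f1 + 1 + f2 = (f1 + f2) + 1 := by omega
    rw [h1]
    simp only [pvVisit, pvIter, ih]
    simp

theorem pvIter_straight (n : Int) (hn : 0 < n) :
    ∀ (f : Nat) (i : Int), 0 ≤ i → i < n → i + (f : Int) ≤ n →
      pvIter n f i = if i + (f : Int) = n then 0 else i + f := by
  intro f
  induction f with
  | zero => intro i h0 hlt hle; simp only [pvIter]; push_cast; omega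
  | succ f ih =>
    intro i h0 hlt hle
    simp only [pvIter]
    by_cases hi1 : i + 1 < n
    · have hm : PySem.Int.mod (i + 1) n = i + 1 := by
        rw [PySem.Int.mod_eq_emod_of_pos hn, Int.emod_eq_of_lt (by omega) hi1]
      rw [hm, ih (i+1) (by omega) hi1 (by push_cast at hle ⊢; omega)]
      push_cast; split_ifs <;> omega
    · have hi1' : i + 1 = n := by push_cast at hle; omega
      have hf : f = 0 := by push_cast at hle; omega
      subst hf
      have hm : PySem.Int.mod (i + 1) n = 0 := by
        rw [PySem.Int.mod_eq_emod_of_pos hn, hi1', Int.emod_self]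
      simp only [pvIter, hm]
      push_cast; omega

theorem pvIntRange_mem : ∀ (f : Nat) (a x : Int), x ∈ pvIntRange a f ↔ a ≤ x ∧ x < a + f := by
  intro f
  induction f with
  | zero => intro a x; simp [pvIntRange]
  | succ f ih =>
    intro a x
    simp only [pvIntRange, List.mem_cons, ih]
    push_cast; omega

theorem pvIntRange_succ_right : ∀ (f : Nat) (a : Int), pvIntRange a (f + 1) = pvIntRange a f ++ [a + f] := by
  intro f
  induction f with
  | zero => intro a; simp [pvIntRange]
  | succ f ih =>
    intro a
    have h1 : pvIntRange a (f + 1 + 1) = a :: pvIntRange (a + 1) (f + 1) := rfl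
    have h2 : pvIntRange a (f + 1) = a :: pvIntRange (a + 1) f := rfl
    rw [h1, ih (a + 1), h2, List.cons_append]
    have h3 : a + 1 + (f : Int) = a + ((f + 1 : Nat) : Int) := by push_cast; ring
    rw [h3]

theorem pvIntRange_pairwise : ∀ (f : Nat) (a : Int), (pvIntRange a f).Pairwise (· < ·) := by
  intro f
  induction f with
  | zero => intro a; simp [pvIntRange]
  | succ f ih =>
    intro a
    simp only [pvIntRange, List.pairwise_cons]
    exact ⟨fun x hx => ((pvIntRange_mem f (a+1) x).mp hx).1.trans_lt' (by omega), ih (a+1)⟩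

theorem pvIntRange_add : ∀ (f1 f2 : Nat) (a : Int),
    pvIntRange a (f1 + f2) = pvIntRange a f1 ++ pvIntRange (a + f1) f2 := by
  intro f1
  induction f1 with
  | zero => intro f2 a; simp [pvIntRange]
  | succ f1 ih =>
    intro f2 a
    have h1 : f1 + 1 + f2 = (f1 + f2) + 1 := by omega
    have h2 : pvIntRange a ((f1 + f2) + 1) = a :: pvIntRange (a + 1) (f1 + f2) := rfl
    have h3 : pvIntRange a (f1 + 1) = a :: pvIntRange (a + 1) f1 := rfl
    rw [h1, h2, ih, h3, List.cons_append]
    have h4 : a + 1 + (f1 : Int) = a + ((f1 + 1 : Nat) : Int) := by push_cast; ring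
    rw [h4]

-- skipping non-valley indices: pvProc equals pvProcV on the filtered index list
theorem pvProc_eq_procV (border : List (Int × Int)) (n ov : Int) :
    ∀ (L : List Int) (prev : Int) (maxd : Option Int),
      (∀ i ∈ L, (PySem.List.pyGet? border i).isSome) →
      pvProc border n ov L prev maxd = pvProcV n ov (L.filter (pvValleyAt border)) prev maxd := by
  intro L
  induction L with
  | nil => intro prev maxd _; rfl
  | cons i L ih =>
    intro prev maxd hs
    have hi := hs i (by simp)
    simp only [pvProc, List.filter_cons]
    cases h : PySem.List.pyGet? border i with
    | none => rw [h] at hi; simp at hi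
    | some v =>
      have hva : pvValleyAt border i = pvIsValley v := by simp [pvValleyAt, h]
      by_cases hv : pvIsValley v
      · rw [hva, hv]
        simp only [pvProcV, if_true]
        by_cases hio : i = ov
        · simp [hv, hio]
        · have hsL : ∀ j ∈ L, (PySem.List.pyGet? border j).isSome := fun j hj => hs j (by simp [hj])
          simp only [hv, if_true, hio, ite_false]
          rw [ih _ _ hsL]
      · have hva' : pvValleyAt border i = false := by rw [hva]; simpa using hv
        rw [hva']
        simp only [Bool.false_eq_true, if_false]
        rw [if_neg hv]
        exact ih prev maxd (fun j hj => hs j (by simp [hj]))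

-- A's 'next(...)' returns the head of B's valleys list
theorem pvFirstValley_eq_head : ∀ (l : List (Int × Int)) (s : Int),
    pvFirstValley l s =
      ((PySem.List.enumerate l s).filterMap (fun p => if pvIsValley p.2 then some p.1 else none)).head? := by
  intro l
  induction l with
  | nil => intro s; simp [pvFirstValley, PySem.List.enumerate_nil]
  | cons v l ih =>
    intro s
    rw [PySem.List.enumerate_cons]
    simp only [pvFirstValley, List.filterMap_cons]
    by_cases hv : pvIsValley v
    · simp [hv]
    · simp [hv, ih]

-- B's valleys list is the filter of the index range by pvValleyAt
theorem pvValleys_spec (border : List (Int × Int)) :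
    ∀ (suf pre : List (Int × Int)), border = pre ++ suf →
      (PySem.List.enumerate suf (pre.length : Int)).filterMap
          (fun p => if pvIsValley p.2 then some p.1 else none)
        = (pvIntRange (pre.length : Int) suf.length).filter (pvValleyAt border) := by
  intro suf
  induction suf with
  | nil => intro pre _; simp [PySem.List.enumerate_nil, pvIntRange]
  | cons v suf ih =>
    intro pre hb
    rw [PySem.List.enumerate_cons]
    have hr : pvIntRange (pre.length : Int) (suf.length + 1)
        = (pre.length : Int) :: pvIntRange ((pre.length : Int) + 1) suf.length := rfl
    simp only [List.length_cons, List.filterMap_cons, hr, List.filter_cons]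
    have hget : PySem.List.pyGet? border (pre.length : Int) = some v := by
      rw [hb]; exact PySem.List.pyGet?_append_length pre suf v
    have hva : pvValleyAt border (pre.length : Int) = pvIsValley v := by
      simp [pvValleyAt, hget]
    have hpre : border = (pre ++ [v]) ++ suf := by simp [hb]
    have hlen : ((pre ++ [v]).length : Int) = (pre.length : Int) + 1 := by simp
    have ihx := ih (pre ++ [v]) hpre
    rw [hlen] at ihx
    by_cases hv : pvIsValley v
    · rw [hva, hv]; simp only [if_true]; rw [ihx]
    · have : pvValleyAt border (pre.length : Int) = false := by rw [hva]; simpa using hv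
      rw [this]; simp only [hv, Bool.false_eq_true, if_false]; rw [ihx]

def pvMFold : Option Int → List Int → Int
  | acc, [] => acc.getD 0
  | acc, g :: gs =>
      pvMFold (some (match acc with | none => g | some m => if g > m then g else m)) gs

theorem pvMFold_some : ∀ (gs : List Int) (m : Int), pvMFold (some m) gs = gs.foldl max m := by
  intro gs
  induction gs with
  | nil => intro m; rfl
  | cons g gs ih =>
    intro m
    simp only [pvMFold, List.foldl_cons]
    rw [ih]
    congr 1
    by_cases h : g > m
    · simp [h, max_eq_right (le_of_lt h)]
    · simp only [h, ite_false]
      omega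

theorem pvMFold_none_cons (g : Int) (gs : List Int) : pvMFold none (g :: gs) = gs.foldl max g := by
  simp only [pvMFold]
  exact pvMFold_some gs g

-- the heart of the A side: the valley-to-valley walk over a strictly increasing valley list
theorem pvProcV_core (n ov : Int) :
    ∀ (ws : List Int) (prev : Int) (maxd : Option Int),
      ov ≤ prev → List.IsChain (· < ·) (prev :: ws) →
      pvProcV n ov (ws ++ [ov]) prev maxd
        = n - pvMFold maxd (pvGapsOf prev ws ++ [ov + n - pvLastOf prev ws]) := by
  intro ws
  induction ws with
  | nil =>
    intro prev maxd hop _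
    simp only [List.nil_append, pvProcV, pvGapsOf, pvLastOf, pvMFold]
    have harith : ov - prev + n = ov + n - prev := by ring
    rw [if_pos (show ov - prev ≤ 0 by omega)]
    cases maxd with
    | none => simp [harith]
    | some m => simp [harith]
  | cons w ws ih =>
    intro prev maxd hop hch
    rw [List.isChain_cons_cons] at hch
    obtain ⟨hpw, hch⟩ := hch
    simp only [List.cons_append, pvProcV, pvGapsOf, pvLastOf]
    rw [if_neg (show ¬ (w - prev ≤ 0) by omega), if_neg (show ¬ (w = ov) by omega)]
    rw [ih w _ (by omega) hch]
    rfl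

theorem pvFilter_range_head (N : Nat) (p : Int → Bool) (ov : Int)
    (h : ((pvIntRange 0 N).filter p).head? = some ov) :
    0 ≤ ov ∧ ov < (N : Int) ∧ p ov = true ∧
      (pvIntRange 0 ov.toNat).filter p = [] ∧
      (pvIntRange 0 N).filter p = ov :: (pvIntRange (ov + 1) (N - ov.toNat - 1)).filter p := by
  have hmem : ov ∈ (pvIntRange 0 N).filter p := by
    cases hl : (pvIntRange 0 N).filter p with
    | nil => rw [hl] at h; simp at h
    | cons x t => rw [hl] at h; simp at h; rw [h]; simp
  obtain ⟨hov_mem, hp⟩ := List.mem_filter.mp hmem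
  rw [pvIntRange_mem] at hov_mem
  have h0 : 0 ≤ ov := hov_mem.1
  have hkov : (ov.toNat : Int) = ov := Int.toNat_of_nonneg h0
  have hltN : ov < (N : Int) := by have := hov_mem.2; omega
  have hkN : ov.toNat < N := by omega
  have hsplit : N = ov.toNat + ((N - ov.toNat - 1) + 1) := by omega
  have e1 : pvIntRange 0 N = pvIntRange 0 ov.toNat ++ pvIntRange ((0:Int) + ov.toNat) ((N - ov.toNat - 1) + 1) := by
    conv_lhs => rw [hsplit]
    exact pvIntRange_add ov.toNat _ 0
  have e2 : pvIntRange ((0:Int) + ov.toNat) ((N - ov.toNat - 1) + 1) = ov :: pvIntRange (ov + 1) (N - ov.toNat - 1) := by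
    have : pvIntRange ((0:Int) + ov.toNat) ((N - ov.toNat - 1) + 1)
        = ((0:Int) + ov.toNat) :: pvIntRange ((0:Int) + ov.toNat + 1) (N - ov.toNat - 1) := rfl
    rw [this, zero_add, hkov]
  cases hf1 : (pvIntRange 0 ov.toNat).filter p with
  | cons x t =>
    exfalso
    have hx : x ∈ (pvIntRange 0 ov.toNat).filter p := by rw [hf1]; simp
    obtain ⟨hxm, _⟩ := List.mem_filter.mp hx
    have hxb := (pvIntRange_mem ov.toNat 0 x).mp hxm
    rw [e1, List.filter_append, hf1] at h
    simp at h
    omega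
  | nil =>
    rw [e1, List.filter_append, hf1, List.nil_append, e2, List.filter_cons] at h
    by_cases hpk : p ov
    · refine ⟨h0, hltN, hpk, rfl, ?_⟩
      rw [e1, List.filter_append, hf1, List.nil_append, e2, List.filter_cons, if_pos hpk]
    · exfalso
      rw [if_neg hpk] at h
      have : ov ∈ (pvIntRange (ov + 1) (N - ov.toNat - 1)).filter p := by
        cases hl : (pvIntRange (ov + 1) (N - ov.toNat - 1)).filter p with
        | nil => rw [hl] at h; simp at h
        | cons x t => rw [hl] at h; simp at h; rw [h]; simp
      obtain ⟨hm2, _⟩ := List.mem_filter.mp this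
      have := (pvIntRange_mem _ (ov + 1) ov).mp hm2
      omega

theorem pvValleys_eq_filter (border : List (Int × Int)) :
    pvValleys border = (pvIntRange 0 border.length).filter (pvValleyAt border) := by
  have := pvValleys_spec border border [] (by simp)
  simpa [pvValleys] using this

theorem pvFirstValley_eq_valleys_head (border : List (Int × Int)) :
    pvFirstValley border 0 = (pvValleys border).head? := by
  simpa [pvValleys] using pvFirstValley_eq_head border 0

-- B-side lemmas: the window list equals (n - ·) mapped over the rotated gap list
theorem pvGapsOf_length : ∀ (ws : List Int) (p : Int), (pvGapsOf p ws).length = ws.length := by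
  intro ws
  induction ws with
  | nil => intro p; rfl
  | cons w t ih => intro p; simp only [pvGapsOf, List.length_cons, ih]

theorem pv_foldl_max_max (l : List Int) : ∀ (a b : Int), l.foldl max (max a b) = max a (l.foldl max b) := by
  induction l with
  | nil => intro a b; rfl
  | cons c t ih =>
    intro a b
    simp only [List.foldl_cons]
    rw [max_assoc, ih]

theorem pv_foldl_min_map (n : Int) : ∀ (gs : List Int) (m : Int),
    (gs.map (fun g => n - g)).foldl min (n - m) = n - gs.foldl max m := by
  intro gs
  induction gs with
  | nil => intro m; rfl
  | cons g t ih =>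
    intro m
    simp only [List.map_cons, List.foldl_cons]
    have : min (n - m) (n - g) = n - max m g := by omega
    rw [this, ih]

theorem pvMFold_append_singleton (gaps : List Int) (w : Int) :
    pvMFold none (gaps ++ [w]) = gaps.foldl max w := by
  cases gaps with
  | nil => rfl
  | cons g gs =>
    rw [List.cons_append, pvMFold_none_cons, List.foldl_append, List.foldl_cons, List.foldl_nil]
    have h1 : (g :: gs).foldl max w = gs.foldl max (max w g) := rfl
    rw [h1, pv_foldl_max_max gs w g, max_comm]

theorem pvGetD_last : ∀ (rest : List Int) (v0 : Int), (v0 :: rest).getD rest.length 0 = pvLastOf v0 rest := by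
  intro rest
  induction rest with
  | nil => intro v0; rfl
  | cons w ws ih =>
    intro v0
    have h : (w :: ws).length = ws.length + 1 := rfl
    rw [h, List.getD_cons_succ, ih w]
    rfl

theorem pvGapsOf_getD : ∀ (rest : List Int) (v0 : Int) (m : Nat), m < rest.length →
    (pvGapsOf v0 rest).getD m 0 = (v0 :: rest).getD (m + 1) 0 - (v0 :: rest).getD m 0 := by
  intro rest
  induction rest with
  | nil => intro v0 m hm; simp at hm
  | cons w ws ih =>
    intro v0 m hm
    cases m with
    | zero => simp [pvGapsOf]
    | succ m =>
      simp only [pvGapsOf, List.getD_cons_succ]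
      exact ih w m (by simpa using hm)

theorem pvGetD_map_add (n : Int) : ∀ (l : List Int) (m : Nat), m < l.length →
    (l.map (fun v => v + n)).getD m 0 = l.getD m 0 + n := by
  intro l
  induction l with
  | nil => intro m hm; simp at hm
  | cons x xs ih =>
    intro m hm
    cases m with
    | zero => simp
    | succ m =>
      simp only [List.map_cons, List.getD_cons_succ]
      exact ih m (by simpa using hm)

theorem pvWindows_eq (n v0 : Int) (rest : List Int) :
    ((PySem.List.pyRange 0 (((v0 :: rest).length : Nat) : Int) 1).map
        (fun t => PySem.List.pyGetD ((v0 :: rest) ++ (v0 :: rest).map (fun v => v + n)) (t + (((v0 :: rest).length : Nat) : Int) - 1) 0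
                - PySem.List.pyGetD ((v0 :: rest) ++ (v0 :: rest).map (fun v => v + n)) t 0))
      = ((v0 + n - pvLastOf v0 rest) :: pvGapsOf v0 rest).map (fun g => n - g) := by
  have hKv : (v0 :: rest).length = rest.length + 1 := rfl
  have hrange : PySem.List.pyRange 0 (((v0 :: rest).length : Nat) : Int) 1
      = (List.range (rest.length + 1)).map (fun k : Nat => (k : Int)) := by
    rw [PySem.List.pyRange_one]
    simp [hKv]
  rw [hrange, List.map_map]
  apply List.ext_getElem?
  intro j
  by_cases hj : j < rest.length + 1
  · rw [List.getElem?_map, List.getElem?_map, List.getElem?_range hj]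
    have hlen2 : j < ((v0 + n - pvLastOf v0 rest) :: pvGapsOf v0 rest).length := by
      simp [pvGapsOf_length, hj]
    rw [List.getElem?_eq_getElem hlen2]
    simp only [Option.map_some, Function.comp_apply, Option.some.injEq]
    cases j with
    | zero =>
      simp only [List.getElem_cons_zero]
      have hi1 : ((0 : Nat) : Int) + (((v0 :: rest).length : Nat) : Int) - 1 = ((rest.length : Nat) : Int) := by
        rw [hKv]; push_cast; ring
      rw [hi1, PySem.List.pyGetD_natCast, PySem.List.pyGetD_natCast]
      rw [List.getD_append _ _ _ _ (by rw [hKv]; omega), pvGetD_last]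
      rw [List.getD_append _ _ _ _ (by rw [hKv]; omega)]
      simp only [List.getD_cons_zero]
      ring
    | succ m =>
      have hm : m < rest.length := by omega
      have hg : ((v0 + n - pvLastOf v0 rest) :: pvGapsOf v0 rest)[m + 1]'hlen2
          = (pvGapsOf v0 rest).getD m 0 := by
        rw [List.getElem_cons_succ]
        rw [List.getD_eq_getElem _ _ (by rw [pvGapsOf_length]; exact hm)]
      rw [hg, pvGapsOf_getD rest v0 m hm]
      have hi1 : (((m + 1 : Nat)) : Int) + (((v0 :: rest).length : Nat) : Int) - 1
          = ((m + rest.length + 1 : Nat) : Int) := by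
        rw [hKv]; push_cast; ring
      rw [hi1, PySem.List.pyGetD_natCast, PySem.List.pyGetD_natCast]
      rw [List.getD_append_right _ _ _ _ (by rw [hKv]; omega)]
      have hsub : m + rest.length + 1 - (v0 :: rest).length = m := by rw [hKv]; omega
      rw [hsub, pvGetD_map_add n _ _ (by rw [hKv]; omega)]
      rw [List.getD_append _ _ _ _ (by rw [hKv]; omega)]
      omega
  · apply Eq.trans (List.getElem?_eq_none (by simp; omega))
    exact (List.getElem?_eq_none (by simp [pvGapsOf_length]; omega)).symm

-- ===== VERDICT support: main proof =====
theorem valley_to_valley_spec : Claim_equal_valley_to_valley := by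
  unfold Claim_equal_valley_to_valley
  intro border _
  unfold Spec_valley_to_valley
  cases hh : pvFirstValley border 0 with
  | none =>
    have hnil : pvValleys border = [] := by
      rw [← List.head?_eq_none_iff, ← pvFirstValley_eq_valleys_head, hh]
    simp only [valley_to_valley, valley_to_valley_alt, hh, hnil]
    simp
  | some ov =>
    have hhead : ((pvIntRange 0 border.length).filter (pvValleyAt border)).head? = some ov := by
      rw [← pvValleys_eq_filter, ← pvFirstValley_eq_valleys_head, hh]
    obtain ⟨h0, hltN, hpov, hpre_nil, heq⟩ := pvFilter_range_head border.length _ ov hhead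
    have hkov : (ov.toNat : Int) = ov := Int.toNat_of_nonneg h0
    have hkN : ov.toNat < border.length := by omega
    have hn : 0 < (border.length : Int) := by omega
    set rest := (pvIntRange (ov + 1) (border.length - ov.toNat - 1)).filter (pvValleyAt border) with hrest
    have hVS : pvValleys border = ov :: rest := by
      rw [pvValleys_eq_filter, heq]
    -- visited index list
    have hvisit : pvVisit (border.length : Int) border.length (PySem.Int.mod (ov + 1) (border.length : Int))
        = pvIntRange (ov + 1) (border.length - ov.toNat - 1) ++ pvIntRange 0 (ov.toNat + 1) := by
      by_cases hcase : ov + 1 < (border.length : Int)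
      · have hm : PySem.Int.mod (ov + 1) (border.length : Int) = ov + 1 := by
          rw [PySem.Int.mod_eq_emod_of_pos hn, Int.emod_eq_of_lt (by omega) hcase]
        have hsplit : border.length = (border.length - ov.toNat - 1) + (ov.toNat + 1) := by omega
        rw [hm]
        set nI : Int := (border.length : Int) with hnI
        conv_lhs => rw [hsplit]
        rw [pvVisit_add]
        have e1 : pvVisit (border.length : Int) (border.length - ov.toNat - 1) (ov + 1)
            = pvIntRange (ov + 1) (border.length - ov.toNat - 1) :=
          pvVisit_straight _ hn _ _ (by omega) (by omega)
        have e2 : pvIter (border.length : Int) (border.length - ov.toNat - 1) (ov + 1) = 0 := by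
          rw [pvIter_straight _ hn _ _ (by omega) hcase (by omega)]
          rw [if_pos (by omega)]
        rw [e1, e2, pvVisit_straight _ hn _ _ (by omega) (by push_cast; omega)]
      · have hov1 : ov + 1 = (border.length : Int) := by omega
        have hm : PySem.Int.mod (ov + 1) (border.length : Int) = 0 := by
          rw [PySem.Int.mod_eq_emod_of_pos hn, hov1, Int.emod_self]
        have hz : border.length - ov.toNat - 1 = 0 := by omega
        have hk1 : ov.toNat + 1 = border.length := by omega
        rw [hm, hz, hk1]
        rw [pvVisit_straight _ hn _ _ (by omega) (by omega)]
        rfl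
    -- all visited indices are in range
    have hsafe : ∀ i ∈ pvIntRange (ov + 1) (border.length - ov.toNat - 1) ++ pvIntRange 0 (ov.toNat + 1),
        (PySem.List.pyGet? border i).isSome := by
      intro i hi
      have hib : 0 ≤ i ∧ i < (border.length : Int) := by
        rcases List.mem_append.mp hi with hi | hi
        · have := (pvIntRange_mem _ _ _).mp hi; constructor <;> [omega; (push_cast at this ⊢; omega)]
        · have := (pvIntRange_mem _ _ _).mp hi; constructor <;> [omega; (push_cast at this ⊢; omega)]
      rw [PySem.List.pyGet?_of_nonneg _ hib.1]
      have : i.toNat < border.length := by omega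
      simp [this]
    -- the filtered visit list is rest ++ [ov]
    have hfilt : (pvIntRange (ov + 1) (border.length - ov.toNat - 1) ++ pvIntRange 0 (ov.toNat + 1)).filter (pvValleyAt border)
        = rest ++ [ov] := by
      rw [List.filter_append, hrest]
      congr 1
      rw [pvIntRange_succ_right, List.filter_append, hpre_nil, List.nil_append]
      simp only [List.filter_cons, List.filter_nil, zero_add, hkov, hpov, if_pos]
    -- chain property of the valley list
    have hpw : (ov :: rest).Pairwise (· < ·) := by
      rw [hrest, ← heq]
      exact (pvIntRange_pairwise _ _).filter _
    have hch : List.IsChain (· < ·) (ov :: rest) := hpw.isChain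
    -- A side: n minus the running max over the gap list
    have hA : valley_to_valley border
        = (border.length : Int) - pvMFold none
            (pvGapsOf ov rest ++ [ov + (border.length : Int) - pvLastOf ov rest]) := by
      simp only [valley_to_valley, hh]
      rw [pvLoopA_eq_proc, hvisit, pvProc_eq_procV _ _ _ _ _ _ hsafe, hfilt,
        pvProcV_core _ _ _ _ _ le_rfl hch]
    -- B side: min over the window list
    have hB : valley_to_valley_alt border
        = (border.length : Int) - (pvGapsOf ov rest).foldl max (ov + (border.length : Int) - pvLastOf ov rest) := by
      simp only [valley_to_valley_alt, hVS]
      rw [if_neg (by simp)]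
      rw [pvWindows_eq (border.length : Int) ov rest]
      rw [List.map_cons, PySem.List.min?_id_cons, pv_foldl_min_map]
    rw [hA, hB, pvMFold_append_singleton]
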